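-- pv_equiv track=rewrite | github.com/MaheshwarSoma25/Python | Easy PS/p6.py | check_middle
-- ===== SOURCE A (Python) =====
-- def check_middle(num):
--     num_str = str(num)
--     length = 0
--     for _ in num_str:
--         length += 1               # Calculate length manually
--
--     if length < 3:
--         return False               # Not enough digits
--
--     first = int(num_str[0])       # First digit
--     last = int(num_str[-1])       # Last digit
--
--     mid_sum = 0
--     for i in range(1, length-1):
--         mid_sum += int(num_str[i]) # Sum of middle digits
--
--     return mid_sum < (first + last)
-- ===== SOURCE B (Python) =====
-- def check_middle(num):
--     # Pure arithmetic: no string conversion at all. Numbers below 100 have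
--     # fewer than 3 decimal digits, so they cannot have a middle.
--     if num < 100:
--         return False
--     last = num % 10
--     n = num // 10
--     mid = 0
--     while n >= 10:
--         mid += n % 10
--         n //= 10
--     # n is now the leading (first) digit
--     return mid < n + last
-- ===== Notes on version B (the rewrite author's own statement) =====
-- stated objective: alternative
-- what changed: Replaces A's string conversion, manual character counting, per-character int() parsing and indexed middle loop by pure integer arithmetic: a divmod loop peels decimal digits off the number itself, accumulating the middle digits and leaving the first digit as the loop remainder.
import Mathlib
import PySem

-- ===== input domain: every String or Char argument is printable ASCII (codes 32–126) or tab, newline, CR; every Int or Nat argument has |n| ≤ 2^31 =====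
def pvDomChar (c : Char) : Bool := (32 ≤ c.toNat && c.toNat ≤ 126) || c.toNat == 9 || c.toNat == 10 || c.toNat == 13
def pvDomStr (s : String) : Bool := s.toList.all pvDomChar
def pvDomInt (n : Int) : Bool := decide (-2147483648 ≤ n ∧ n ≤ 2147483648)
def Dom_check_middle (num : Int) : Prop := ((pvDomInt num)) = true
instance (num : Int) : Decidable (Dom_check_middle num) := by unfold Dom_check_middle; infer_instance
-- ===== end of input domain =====

-- B drops the string representation entirely: a divmod loop peels the decimal digits off
-- the number itself (alternative algorithm, same value on Pre_).

-- ===== PORT A =====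
-- int(c) for a single character; exact inside Pre_ (there every indexed
-- character is a decimal digit, so ofChars? is some and the default 0 is unused).
def pvDigit (c : Char) : Int := (PySem.Int.ofChars? [c]).getD 0

def check_middle (num : Int) : Bool :=
  let numStr := (PySem.Int.toStr num).toList
  let length : Int := numStr.foldl (fun l _ => l + 1) 0   -- manual length loop
  if length < 3 then false
  else
    -- inside Pre_ the indices 0, -1 and 1..length-2 are in range, so pyGetD's default is unused
    let first := pvDigit (PySem.List.pyGetD numStr 0 ' ')
    let last  := pvDigit (PySem.List.pyGetD numStr (-1) ' ')
    let midSum := (PySem.List.pyRange 1 (length - 1) 1).foldl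
        (fun acc i => acc + pvDigit (PySem.List.pyGetD numStr i ' ')) 0
    decide (midSum < first + last)

-- ===== PORT B =====
-- B's while loop: accumulate the non-leading digits, stop when one digit (the first) is left
def pvBLoop (n acc : Int) : Int × Int :=
  if 10 ≤ n then
    pvBLoop (PySem.Int.floordiv n 10) (acc + PySem.Int.mod n 10)
  else (n, acc)
termination_by n.toNat
decreasing_by
  rw [PySem.Int.floordiv_eq_ediv_of_pos (by omega : (0:Int) < 10)]
  omega

def check_middle_alt (num : Int) : Bool :=
  if num < 100 then false
  else
    let last := PySem.Int.mod num 10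
    let n := PySem.Int.floordiv num 10
    let p := pvBLoop n 0
    decide (p.2 < p.1 + last)

-- ===== PRECONDITION & SPEC =====
-- Pre_ excludes exactly the inputs num ≤ -10, where str(num) has ≥ 3 characters starting
-- with '-' and A raises ValueError at int('-').
def Pre_check_middle (num : Int) : Prop := -9 ≤ num
instance (num : Int) : Decidable (Pre_check_middle num) := by unfold Pre_check_middle; infer_instance
def pvWitness_check_middle : Int := (121)
def Spec_check_middle (num : Int) (out : Bool) : Prop := out = check_middle_alt num
instance (num : Int) (out : Bool) : Decidable (Spec_check_middle num out) := by unfold Spec_check_middle; infer_instance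

-- ===== CLAIM (what is proved, stated in full; the proofs are below) =====
def Claim_equal_check_middle : Prop := ∀ (num : Int), Dom_check_middle num → Pre_check_middle num → Spec_check_middle num (check_middle num)

-- ===== LEMMAS AND PROOFS =====

-- decimal value of the leading (most significant) digit character of str(m)
def pvMsd (m : Nat) : Int := pvDigit ((Nat.toDigits 10 m).headI)
-- sum of the decimal values of all digit characters of str(m)
def pvS (m : Nat) : Int := ((Nat.toDigits 10 m).map pvDigit).sum

-- A's manual counting loop computes the list length.
lemma pvCount_eq_length (l : List Char) (init : Int) :
    l.foldl (fun l _ => l + 1) init = init + l.length := by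
  induction l generalizing init with
  | nil => simp
  | cons c tl ih => simp [List.foldl, ih]; ring

-- one unfolding step of Nat.toDigitsCore
lemma pvCore_succ (f n : Nat) (ds : List Char) :
    Nat.toDigitsCore 10 (f+1) n ds =
      if n / 10 = 0 then (n % 10).digitChar :: ds
      else Nat.toDigitsCore 10 f (n / 10) ((n % 10).digitChar :: ds) := by
  simp only [Nat.toDigitsCore]

-- Nat.toDigitsCore threads its accumulator as a suffix.
lemma pvCore_append (fuel : Nat) : ∀ (n : Nat) (ds : List Char),
    Nat.toDigitsCore 10 fuel n ds = Nat.toDigitsCore 10 fuel n [] ++ ds := by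
  induction fuel with
  | zero => intro n ds; simp [Nat.toDigitsCore]
  | succ f ih =>
    intro n ds
    rw [pvCore_succ, pvCore_succ]
    split
    · simp
    · rw [ih (n / 10) ((n % 10).digitChar :: ds), ih (n / 10) [(n % 10).digitChar]]
      simp

-- fuel irrelevance for Nat.toDigitsCore, given enough fuel
lemma pvCore_fuel : ∀ (n f1 f2 : Nat), n < f1 → n < f2 →
    Nat.toDigitsCore 10 f1 n [] = Nat.toDigitsCore 10 f2 n [] := by
  intro n
  induction n using Nat.strong_induction_on with
  | _ n ih =>
    intro f1 f2 h1 h2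
    obtain ⟨g1, rfl⟩ : ∃ g, f1 = g + 1 := ⟨f1 - 1, by omega⟩
    obtain ⟨g2, rfl⟩ : ∃ g, f2 = g + 1 := ⟨f2 - 1, by omega⟩
    rw [pvCore_succ, pvCore_succ]
    split
    · rfl
    · rename_i hne
      rw [pvCore_append g1, pvCore_append g2,
        ih (n / 10) (by omega) g1 g2 (by omega) (by omega)]

-- the structural recursion of Nat.toDigits 10
lemma pvToDigits_rec (n : Nat) :
    Nat.toDigits 10 n = if n < 10 then [Nat.digitChar n]
      else Nat.toDigits 10 (n / 10) ++ [Nat.digitChar (n % 10)] := by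
  simp only [Nat.toDigits]
  rw [pvCore_succ]
  by_cases h : n < 10
  · have h0 : n / 10 = 0 := by omega
    have hm : n % 10 = n := by omega
    rw [if_pos h0, if_pos h, hm]
  · have h0 : ¬ n / 10 = 0 := by omega
    rw [if_neg h0, if_neg h, pvCore_append n (n / 10)]
    congr 1
    exact pvCore_fuel (n / 10) n ((n / 10) + 1) (by omega) (by omega)

lemma pvToDigits_ne_nil (n : Nat) : Nat.toDigits 10 n ≠ [] := by
  rw [pvToDigits_rec]; split <;> simp

lemma pvDigit_digitChar (d : Nat) (h : d < 10) : pvDigit (Nat.digitChar d) = (d : Int) := by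
  interval_cases d <;> decide

-- peeling the last decimal digit (n ≥ 10) keeps the leading digit and drops n % 10 from the sum
lemma pvMsd_div (m : Nat) (h : 10 ≤ m) : pvMsd m = pvMsd (m / 10) := by
  unfold pvMsd
  rw [pvToDigits_rec m, if_neg (by omega)]
  cases hq : Nat.toDigits 10 (m / 10) with
  | nil => exact absurd hq (pvToDigits_ne_nil _)
  | cons a t => simp

lemma pvS_div (m : Nat) (h : 10 ≤ m) : pvS m = pvS (m / 10) + ((m % 10 : Nat) : Int) := by
  unfold pvS
  rw [pvToDigits_rec m, if_neg (by omega)]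
  simp [pvDigit_digitChar (m % 10) (by omega)]

lemma pvMsd_single (m : Nat) (h : m < 10) : pvMsd m = (m : Int) := by
  unfold pvMsd
  rw [pvToDigits_rec m, if_pos h]
  simp [pvDigit_digitChar m h]

lemma pvS_single (m : Nat) (h : m < 10) : pvS m = (m : Int) := by
  unfold pvS
  rw [pvToDigits_rec m, if_pos h]
  simp [pvDigit_digitChar m h]

-- B's loop computes (leading digit of n, acc + sum of the non-leading digits of n)
lemma pvBLoop_spec : ∀ (k : Nat) (n : Int), n.toNat = k → 1 ≤ n → ∀ acc,
    pvBLoop n acc = (pvMsd n.toNat, acc + pvS n.toNat - pvMsd n.toNat) := by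
  intro k
  induction k using Nat.strong_induction_on with
  | _ k ih =>
    intro n hk hn acc
    rw [pvBLoop]
    by_cases h : 10 ≤ n
    · rw [if_pos h]
      have hfd : PySem.Int.floordiv n 10 = n / 10 :=
        PySem.Int.floordiv_eq_ediv_of_pos (by omega)
      have hmd : PySem.Int.mod n 10 = n % 10 :=
        PySem.Int.mod_eq_emod_of_pos (by omega)
      have htn : (n / 10).toNat = n.toNat / 10 := by omega
      have hmod : n % 10 = ((n.toNat % 10 : Nat) : Int) := by omega
      rw [hfd, hmd, ih (n / 10).toNat (by omega) (n / 10) rfl (by omega), htn, hmod,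
        pvMsd_div n.toNat (by omega), pvS_div n.toNat (by omega)]
      congr 1
      ring
    · rw [if_neg h]
      have h10 : n.toNat < 10 := by omega
      rw [pvMsd_single _ h10, pvS_single _ h10]
      congr 1 <;> omega

-- length of str(m), by hundreds
lemma pvLen_lt (m : Nat) (h : m < 100) : (Nat.toDigits 10 m).length < 3 := by
  rw [pvToDigits_rec m]
  by_cases h1 : m < 10
  · simp [h1]
  · rw [if_neg h1, pvToDigits_rec (m / 10), if_pos (by omega)]
    simp

lemma pvLen_ge (m : Nat) (h : 100 ≤ m) : 3 ≤ (Nat.toDigits 10 m).length := by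
  rw [pvToDigits_rec m, if_neg (by omega), pvToDigits_rec (m / 10), if_neg (by omega)]
  have hne := pvToDigits_ne_nil (m / 10 / 10)
  have h1 : 1 ≤ (Nat.toDigits 10 (m / 10 / 10)).length := by
    cases hq : Nat.toDigits 10 (m / 10 / 10) with
    | nil => exact absurd hq hne
    | cons a t => simp
  simp only [List.length_append, List.length_cons, List.length_nil]
  omega

-- A's middle loop sums pvDigit over the sub-list mid of pre ++ mid ++ suf.
lemma pvMidFold (mid : List Char) (pre suf : List Char) (init : Int) :
    (PySem.List.pyRange pre.length (pre.length + mid.length) 1).foldl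
      (fun acc i => acc + pvDigit (PySem.List.pyGetD (pre ++ mid ++ suf) i ' ')) init
    = init + (mid.map pvDigit).sum := by
  induction mid generalizing pre init with
  | nil => simp [PySem.List.pyRange_one_eq_nil]
  | cons c tl ih =>
    rw [PySem.List.pyRange_one_cons (by simp)]
    simp only [List.foldl_cons]
    have hget : PySem.List.pyGetD (pre ++ (c :: tl) ++ suf) (pre.length : Int) ' ' = c := by
      have : pre ++ (c :: tl) ++ suf = pre ++ c :: (tl ++ suf) := by simp
      rw [this, PySem.List.pyGetD_natCast]
      simp [List.getD_eq_getElem?_getD]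
    have hlist : pre ++ (c :: tl) ++ suf = (pre ++ [c]) ++ tl ++ suf := by simp
    have hlen : (pre.length : Int) + 1 = ((pre ++ [c]).length : Int) := by simp
    have hub : (pre.length : Int) + (c :: tl).length
        = ((pre ++ [c]).length : Int) + tl.length := by simp; omega
    rw [hget, hlist, hlen, hub, ih]
    simp; ring

-- ===== VERDICT (by name: the statement is the Claim_ definition above) =====
theorem check_middle_spec : Claim_equal_check_middle := by
  intro num _ hpre
  have hpre' : (-9 : Int) ≤ num := hpre
  unfold Spec_check_middle check_middle check_middle_alt
  simp only [PySem.Int.toList_toStr]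
  obtain ⟨l, hl⟩ : ∃ l, PySem.Int.toChars num = l := ⟨_, rfl⟩
  rw [hl, pvCount_eq_length]
  by_cases hnum : num < 100
  · -- fewer than 3 characters on the A side, num < 100 on the B side: both return false
    have hlen : l.length < 3 := by
      rw [← hl]
      by_cases hneg : num < 0
      · simp only [PySem.Int.toChars, if_pos hneg]
        rw [pvToDigits_rec, if_pos (by omega : num.natAbs < 10)]
        simp
      · simp only [PySem.Int.toChars, if_neg hneg]
        exact pvLen_lt num.toNat (by omega)
    rw [if_pos (by omega : (0 : Int) + l.length < 3), if_pos hnum]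
  · -- num ≥ 100: at least 3 digits, no '-' sign
    have hm : 100 ≤ num.toNat := by omega
    have hneg : ¬ num < 0 := by omega
    have hl2 : l = Nat.toDigits 10 num.toNat := by
      rw [← hl]; simp only [PySem.Int.toChars, if_neg hneg]
    have hlen3 : 3 ≤ l.length := hl2 ▸ pvLen_ge num.toNat hm
    rw [if_neg (by omega : ¬ ((0 : Int) + l.length < 3)), if_neg hnum]
    -- decompose l = c0 :: mid ++ [cl]
    obtain ⟨c0, rest, hrest⟩ : ∃ c0 rest, l = c0 :: rest := by
      cases l with
      | nil => simp at hlen3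
      | cons a b => exact ⟨a, b, rfl⟩
    have hrne : rest ≠ [] := by
      intro h; rw [h] at hrest; rw [hrest] at hlen3; simp at hlen3
    obtain ⟨mid, cl, hmid⟩ : ∃ mid cl, rest = mid ++ [cl] :=
      ⟨rest.dropLast, rest.getLast hrne, (List.dropLast_append_getLast hrne).symm⟩
    have hdecomp : l = [c0] ++ mid ++ [cl] := by rw [hrest, hmid]; simp
    -- A's three pieces
    have hfirstA : PySem.List.pyGetD l 0 ' ' = c0 := by
      rw [hrest]; exact PySem.List.pyGetD_zero_cons _ _ _
    have hlastA : PySem.List.pyGetD l (-1) ' ' = cl := by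
      have h' : l = (c0 :: mid) ++ [cl] := by rw [hrest, hmid]; simp
      rw [h']; exact PySem.List.pyGetD_neg_one_append_singleton _ _ _
    have hmidA : (PySem.List.pyRange 1 ((0 : Int) + l.length - 1) 1).foldl
        (fun acc i => acc + pvDigit (PySem.List.pyGetD l i ' ')) 0
        = (mid.map pvDigit).sum := by
      have key := pvMidFold mid [c0] [cl] 0
      have e1 : ((([c0] : List Char).length : Int)) = 1 := by simp
      rw [e1] at key
      have e2 : (1 : Int) + (mid.length : Int) = 0 + l.length - 1 := by
        rw [hdecomp]; simp; omega
      rw [e2, ← hdecomp] at key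
      simpa using key
    -- identify the digit values arithmetically
    have hsplit : l = Nat.toDigits 10 (num.toNat / 10) ++ [Nat.digitChar (num.toNat % 10)] := by
      rw [hl2, pvToDigits_rec, if_neg (by omega)]
    have hcl : cl = Nat.digitChar (num.toNat % 10) := by
      have h' : (c0 :: mid) ++ [cl]
          = Nat.toDigits 10 (num.toNat / 10) ++ [Nat.digitChar (num.toNat % 10)] := by
        rw [← hsplit, hrest, hmid]; simp
      have := (List.append_inj' h' (by simp)).2
      simpa using this
    have hc0 : pvDigit c0 = pvMsd num.toNat := by
      unfold pvMsd
      rw [← hl2, hdecomp]; simp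
    have hclval : pvDigit cl = ((num.toNat % 10 : Nat) : Int) := by
      rw [hcl]; exact pvDigit_digitChar _ (by omega)
    have hSm : pvS num.toNat = pvDigit c0 + ((mid.map pvDigit).sum + pvDigit cl) := by
      unfold pvS
      rw [← hl2, hdecomp]; simp
    -- B's pieces
    have hfd : PySem.Int.floordiv num 10 = num / 10 :=
      PySem.Int.floordiv_eq_ediv_of_pos (by omega)
    have hmdv : PySem.Int.mod num 10 = ((num.toNat % 10 : Nat) : Int) := by
      rw [PySem.Int.mod_eq_emod_of_pos (by omega)]; omega
    have htn : (num / 10).toNat = num.toNat / 10 := by omega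
    have hbl := pvBLoop_spec (num / 10).toNat (num / 10) rfl (by omega) 0
    rw [htn] at hbl
    rw [hfd, hmdv, hbl, hfirstA, hlastA, hmidA]
    have e1 := pvMsd_div num.toNat (by omega)
    have e2 := pvS_div num.toNat (by omega)
    simp only [decide_eq_decide]
    constructor <;> intro h <;> linarith [hSm, hc0, hclval, e1, e2]
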